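-- pv_equiv track=rewrite | github.com/CiroGamboa/vitalcol | aiserver/ai/stringAnalysis.py | contains_digit
-- ===== SOURCE A (Python) =====
-- def contains_digit(string):
--
--     digits = 0
--     for character in string:
--         if character.isdigit():
--             digits += 1
--
--     if(digits == 0):
--         return 'no'
--     elif(digits < len(string)):
--         return 'some'
--     else:
--         return 'all'
-- ===== SOURCE B (Python) =====
-- def contains_digit(string):
--     has_any = any(c.isdigit() for c in string)
--     has_all = all(c.isdigit() for c in string)
--     if not has_any:
--         return 'no'
--     elif has_all:
--         return 'all'
--     else:
--         return 'some'
-- ===== Notes on version B (the rewrite author's own statement) =====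
-- stated objective: simpler
-- what changed: Replaces the digit counter compared against len(string) with two short-circuiting existence/universality predicates (any/all) and a direct three-way branch.
import Mathlib
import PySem

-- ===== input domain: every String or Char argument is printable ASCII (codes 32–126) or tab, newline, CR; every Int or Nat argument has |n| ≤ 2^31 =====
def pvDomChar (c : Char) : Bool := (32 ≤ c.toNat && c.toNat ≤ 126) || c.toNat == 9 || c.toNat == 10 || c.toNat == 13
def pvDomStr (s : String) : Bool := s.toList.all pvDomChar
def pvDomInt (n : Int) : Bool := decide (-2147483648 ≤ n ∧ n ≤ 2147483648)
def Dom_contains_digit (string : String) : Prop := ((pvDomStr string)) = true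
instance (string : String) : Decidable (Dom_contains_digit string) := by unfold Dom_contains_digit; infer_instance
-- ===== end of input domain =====

-- B replaces A's digit counter compared against len(string) with any/all predicates; objective: simpler.
-- ===== PORT A =====
def contains_digit (string : String) : String :=
  let digits : Int := string.toList.foldl (fun d c => if PySem.Chars.isdigit c then d + 1 else d) 0
  if digits == 0 then "no"
  else if digits < PySem.Str.len string then "some"
  else "all"

-- ===== PORT B =====
def contains_digit_alt (string : String) : String :=
  let has_any := string.toList.any (fun c => PySem.Chars.isdigit c)
  let has_all := string.toList.all (fun c => PySem.Chars.isdigit c)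
  if !has_any then "no"
  else if has_all then "all"
  else "some"

-- ===== PRECONDITION & SPEC =====
def Spec_contains_digit (string : String) (out : String) : Prop := out = contains_digit_alt string
instance (string : String) (out : String) : Decidable (Spec_contains_digit string out) := by unfold Spec_contains_digit; infer_instance

-- ===== CLAIM =====
def Claim_equal_contains_digit : Prop := ∀ (string : String), Dom_contains_digit string → Spec_contains_digit string (contains_digit string)

-- ===== LEMMAS AND PROOFS =====
theorem contains_digit_eq (string : String) :
    contains_digit string = contains_digit_alt string := by
  unfold contains_digit contains_digit_alt
  rw [PySem.List.foldl_if_add_one]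
  simp only [PySem.Str.len, zero_add]
  set l := string.toList with hl
  by_cases hany : l.any (fun c => PySem.Chars.isdigit c) = true
  · have hne : l.countP (fun c => PySem.Chars.isdigit c) ≠ 0 := by
      intro h
      rw [List.countP_eq_zero] at h
      simp only [List.any_eq_true] at hany
      obtain ⟨c, hc, hd⟩ := hany
      exact absurd hd (by simpa using h c hc)
    by_cases hall : l.all (fun c => PySem.Chars.isdigit c) = true
    · have hcnt : l.countP (fun c => PySem.Chars.isdigit c) = l.length :=
        List.countP_eq_length.mpr (by simpa [List.all_eq_true] using hall)
      have hlen0 : l.length ≠ 0 := by omega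
      simp [hany, hall, hcnt, hlen0]
    · have hlt : l.countP (fun c => PySem.Chars.isdigit c) < l.length := by
        have hle := List.countP_le_length (p := fun c => PySem.Chars.isdigit c) (l := l)
        have hne' : l.countP (fun c => PySem.Chars.isdigit c) ≠ l.length := by
          intro h
          exact hall (by simpa [List.all_eq_true] using List.countP_eq_length.mp h)
        omega
      have h2 : (l.countP (fun c => PySem.Chars.isdigit c) : Int) < (l.length : Int) := by
        exact_mod_cast hlt
      simp [hany, hall, hne, h2]
  · have hz : l.countP (fun c => PySem.Chars.isdigit c) = 0 := by
      simp only [Bool.not_eq_true, List.any_eq_false] at hany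
      exact List.countP_eq_zero.mpr (by simpa using hany)
    simp [hany, hz]

-- ===== VERDICT =====
theorem contains_digit_spec : Claim_equal_contains_digit := by
  intro s _
  unfold Spec_contains_digit
  exact contains_digit_eq s
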